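-- pv_equiv track=rewrite | github.com/marcosstefani/flute | flute/files/model.py | _caps
-- ===== SOURCE A (Python) =====
-- def _caps( text ):
--     result = text.replace( "-", " " )
--     result = result.replace( "_", " " )
--     split = result.split()
--     result = ""
--
--     for i in range( len( split ) ):
--         result = result + split[i].capitalize()
--
--     return result
-- ===== SOURCE B (Python) =====
-- def _caps(text):
--     result = ""
--     buf = ""
--     for c in text:
--         if c == '-' or c == '_' or c.isspace():
--             if buf:
--                 result += buf.capitalize()
--                 buf = ""
--         else:
--             buf += c
--     if buf:
--         result += buf.capitalize()
--     return result
-- ===== Notes on version B (the rewrite author's own statement) =====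
-- stated objective: alternative
-- what changed: Replaced the replace/replace/split/index-loop pipeline (three intermediate strings plus a word list) by a single character-level pass that buffers the current word and flushes buf.capitalize() at each delimiter run.
import Mathlib
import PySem

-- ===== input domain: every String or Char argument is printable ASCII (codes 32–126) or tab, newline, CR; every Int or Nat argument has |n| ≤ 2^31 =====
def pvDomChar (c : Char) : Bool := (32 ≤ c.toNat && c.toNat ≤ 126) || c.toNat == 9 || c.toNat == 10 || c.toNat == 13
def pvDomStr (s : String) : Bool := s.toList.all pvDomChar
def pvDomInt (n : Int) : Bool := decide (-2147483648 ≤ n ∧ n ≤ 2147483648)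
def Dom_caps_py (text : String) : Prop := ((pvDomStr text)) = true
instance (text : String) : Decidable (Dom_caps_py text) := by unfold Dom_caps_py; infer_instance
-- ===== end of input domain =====

-- B replaces A's replace/replace/split/index-loop pipeline by one character-level pass with a word buffer (objective: alternative decomposition, same cost).

-- str.capitalize(), ported by hand (exact on the ASCII domain, where titlecasing the
-- first character is upperChar); used by both ports since both Pythons call it.
def pvCap (w : List Char) : List Char :=
  match w with
  | [] => []
  | c :: r => PySem.Chars.upperChar c :: PySem.Chars.lower r

-- ===== PORT A =====
-- ported on text.toList via PySem.Chars (exact: the PySem.Str.* wrappers are these on .toList)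
def caps_py (text : String) : String :=
  let r1 := PySem.Chars.replace text.toList ['-'] [' ']
  let r2 := PySem.Chars.replace r1 ['_'] [' ']
  let split := PySem.Chars.split₀ r2
  String.ofList ((PySem.List.pyRange 0 (PySem.List.len split) 1).foldl
    (fun res i => res ++ pvCap (PySem.List.pyGetD split i [])) [])

-- ===== PORT B =====
-- `c == '-' or c == '_' or c.isspace()`
def pvDelim (c : Char) : Bool := c == '-' || c == '_' || PySem.Chars.isspace c

-- the for-loop of Source B: state = (result, buf); at [] the trailing non-empty buf is flushed
def pvAltGo : List Char → List Char → List Char → List Char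
  | [], res, buf => if buf.isEmpty then res else res ++ pvCap buf
  | c :: rest, res, buf =>
    if pvDelim c then
      if buf.isEmpty then pvAltGo rest res buf
      else pvAltGo rest (res ++ pvCap buf) []
    else pvAltGo rest res (buf ++ [c])

def caps_py_alt (text : String) : String :=
  String.ofList (pvAltGo text.toList [] [])

-- ===== PRECONDITION & SPEC =====
def Spec_caps_py (text : String) (out : String) : Prop := out = caps_py_alt text
instance (text : String) (out : String) : Decidable (Spec_caps_py text out) := by unfold Spec_caps_py; infer_instance

-- ===== CLAIM (what is proved, stated in full; the proofs are below) =====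
def Claim_equal_caps_py : Prop := ∀ (text : String), Dom_caps_py text → Spec_caps_py text (caps_py text)

-- ===== LEMMAS AND PROOFS =====

-- the character substitution performed by A's two single-character replace calls
def pvSub (c : Char) : Char := if c = '-' then ' ' else if c = '_' then ' ' else c

-- PySem.Chars.split₀.go with the already-collected-words accumulator factored out
def pvSplit : List Char → List Char → List (List Char)
  | [], cur => if cur.isEmpty then [] else [cur.reverse]
  | c :: rest, cur =>
    if PySem.Chars.isspace c then
      if cur.isEmpty then pvSplit rest []
      else cur.reverse :: pvSplit rest []
    else pvSplit rest (c :: cur)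

theorem pv_replace_go_single (a b : Char) :
    ∀ (l : List Char) (fuel : Nat) (acc : List Char), l.length ≤ fuel →
      PySem.Chars.replace.go [a] [b] fuel l acc
        = acc.reverse ++ l.map (fun c => if c = a then b else c) := by
  intro l
  induction l with
  | nil =>
    intro fuel acc _
    cases fuel <;> simp [PySem.Chars.replace.go.eq_def]
  | cons c t ih =>
    intro fuel acc h
    cases fuel with
    | zero => simp at h
    | succ f =>
      rw [PySem.Chars.replace.go.eq_def]
      by_cases hc : c = a
      · have hp : [a].isPrefixOf (c :: t) = true := by simp [List.isPrefixOf, hc]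
        simp only [hp, if_true, List.length_cons, List.length_nil, List.drop_succ_cons,
          List.drop_zero, List.reverse_cons, List.reverse_nil, List.nil_append, List.singleton_append]
        rw [ih f (b :: acc) (Nat.le_of_succ_le_succ h)]
        simp [hc]
      · have hp : [a].isPrefixOf (c :: t) = false := by
          simp [List.isPrefixOf]; exact fun h' => (hc h'.symm).elim
        simp only [hp, Bool.false_eq_true, if_false]
        rw [ih f (c :: acc) (Nat.le_of_succ_le_succ h)]
        simp [hc]

theorem pv_replace_single (l : List Char) (a b : Char) :
    PySem.Chars.replace l [a] [b] = l.map (fun c => if c = a then b else c) := by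
  rw [PySem.Chars.replace]
  simp [pv_replace_go_single a b l l.length [] (Nat.le_refl _)]

theorem pv_split0_go (l : List Char) :
    ∀ (cur : List Char) (acc : List (List Char)),
      PySem.Chars.split₀.go l cur acc = acc.reverse ++ pvSplit l cur := by
  induction l with
  | nil =>
    intro cur acc
    rw [PySem.Chars.split₀.go.eq_def, pvSplit]
    by_cases h : cur.isEmpty <;> simp [h]
  | cons c t ih =>
    intro cur acc
    rw [PySem.Chars.split₀.go.eq_def, pvSplit]
    by_cases hs : PySem.Chars.isspace c
    · by_cases h : cur.isEmpty <;> simp [hs, h, ih]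
    · simp [hs, ih]

theorem pv_delim_sub (c : Char) : pvDelim c = PySem.Chars.isspace (pvSub c) := by
  unfold pvDelim pvSub
  by_cases h1 : c = '-'
  · subst h1; decide
  · by_cases h2 : c = '_'
    · subst h2; decide
    · rw [if_neg h1, if_neg h2]
      simp [h1, h2]

theorem pv_sub_of_not_delim (c : Char) (h : pvDelim c = false) : pvSub c = c := by
  have h1 : c ≠ '-' := by intro hc; simp [pvDelim, hc] at h
  have h2 : c ≠ '_' := by intro hc; simp [pvDelim, hc] at h
  simp [pvSub, h1, h2]

theorem pv_altGo_eq (l : List Char) :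
    ∀ (res cur : List Char),
      pvAltGo l res cur.reverse = res ++ ((pvSplit (l.map pvSub) cur).map pvCap).flatten := by
  induction l with
  | nil =>
    intro res cur
    rw [pvAltGo, List.map_nil, pvSplit]
    by_cases h : cur = []
    · simp [h]
    · simp [h]
  | cons c t ih =>
    intro res cur
    rw [List.map_cons, pvAltGo, pvSplit, ← pv_delim_sub]
    by_cases hd : pvDelim c
    · by_cases h : cur = []
      · subst h
        simpa [hd] using ih res []
      · have hne : cur.reverse.isEmpty = false := by simp [h]
        have hne2 : cur.isEmpty = false := by simp [h]
        simp only [hd, if_true, hne, hne2, Bool.false_eq_true, if_false]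
        have := ih (res ++ pvCap cur.reverse) []
        simp only [List.reverse_nil] at this
        rw [this]
        simp
    · simp only [Bool.not_eq_true] at hd
      simp only [hd, Bool.false_eq_true, if_false]
      rw [pv_sub_of_not_delim c hd]
      have h2 : cur.reverse ++ [c] = (c :: cur).reverse := by simp
      rw [h2, ih res (c :: cur)]

-- ===== VERDICT (by name: the statement is the Claim_ definition above) =====
theorem caps_py_spec : Claim_equal_caps_py := by
  intro text _
  unfold Spec_caps_py caps_py caps_py_alt
  simp only [pv_replace_single, List.map_map]
  have hmap : ((fun c => if c = '_' then ' ' else c) ∘ fun c => if c = '-' then ' ' else c) = pvSub := by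
    funext c
    by_cases h1 : c = '-'
    · subst h1; decide
    · by_cases h2 : c = '_'
      · subst h2; decide
      · simp [pvSub, h1, h2]
  rw [hmap]
  rw [PySem.List.foldl_pyRange_zero_pyGetD _ _ (fun res w => res ++ pvCap w) []]
  rw [PySem.List.foldl_append_eq_flatMap pvCap _ []]
  have hb : pvAltGo text.toList [] [] = [] ++ ((pvSplit (text.toList.map pvSub) []).map pvCap).flatten := by
    simpa using pv_altGo_eq text.toList [] []
  rw [hb, PySem.Chars.split₀, pv_split0_go]
  simp [List.flatMap_def]
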